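-- pv_equiv track=rewrite | github.com/n-and-n3/KyoproLibrary | QuotientRange.py | quotient_range
-- ===== SOURCE A (Python) =====
-- import math
--
-- def quotient_range(N):
--     ans = [] # (l,r,v) := x in [l,r) の区間において、N//x = z である。
--     sqrtN = math.isqrt(N)
--     m = N
--     for i in range(1,sqrtN+1):
--         ans.append((i,i+1,N//i))
--         m = N//i
--     for i in range(m-1,0,-1):
--         L = N//(i+1)+1
--         R = N//i+1
--         if L < R:
--           ans.append((L,R,i))
--     return ans
-- ===== SOURCE B (Python) =====
-- def quotient_range(N):
--     # single forward jump loop: for each x, the whole block with the same quotient is emitted at once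
--     ans = []
--     x = 1
--     while x <= N:
--         v = N // x
--         r = N // v
--         ans.append((x, r + 1, v))
--         x = r + 1
--     return ans
-- ===== Notes on version B (the rewrite author's own statement) =====
-- stated objective: simpler
-- what changed: A builds the answer in two passes around isqrt(N) (unit blocks for x<=sqrt(N), then a descending filtered loop over quotient values); B is one forward while-loop that, for each x, computes the block end r = N//(N//x) and jumps straight to the next block.
import Mathlib
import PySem

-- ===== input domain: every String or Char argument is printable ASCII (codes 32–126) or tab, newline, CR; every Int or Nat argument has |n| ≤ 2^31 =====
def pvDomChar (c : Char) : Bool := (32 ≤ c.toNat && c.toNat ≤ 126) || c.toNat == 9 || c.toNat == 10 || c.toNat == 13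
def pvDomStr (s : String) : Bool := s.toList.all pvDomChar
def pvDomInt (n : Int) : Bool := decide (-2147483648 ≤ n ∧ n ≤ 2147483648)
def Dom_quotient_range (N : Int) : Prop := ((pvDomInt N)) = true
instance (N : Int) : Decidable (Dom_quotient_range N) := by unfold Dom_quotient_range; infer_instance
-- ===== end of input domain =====

-- B replaces A's two-pass sqrt-split by a single forward jump-loop over the quotient blocks (simpler decomposition, same O(√N) cost).

-- ===== PORT A =====
def quotient_range (N : Int) : List (Int × Int × Int) :=
  let sqrtN : Int := (Nat.sqrt N.toNat : Nat)   -- math.isqrt(N); raises for N < 0 in Python, excluded by Pre_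
  let p := (PySem.List.pyRange 1 (sqrtN + 1) 1).foldl
    (fun (st : List (Int × Int × Int) × Int) i =>
      (st.1 ++ [(i, i + 1, PySem.Int.floordiv N i)], PySem.Int.floordiv N i))
    ([], N)
  (PySem.List.pyRange (p.2 - 1) 0 (-1)).foldl
    (fun ans i =>
      let L := PySem.Int.floordiv N (i + 1) + 1
      let R := PySem.Int.floordiv N i + 1
      if L < R then ans ++ [(L, R, i)] else ans) p.1

-- ===== PORT B =====
-- termination fact for the while-loop: the next position r + 1 = N//(N//x) + 1 is strictly beyond x
theorem qrLoop_progress (N x : Int) (h1 : 1 ≤ x) (h2 : x ≤ N) :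
    x ≤ PySem.Int.floordiv N (PySem.Int.floordiv N x) := by
  have hx : (0:Int) < x := by omega
  have hv : 1 ≤ PySem.Int.floordiv N x := by
    rw [PySem.Int.le_floordiv_iff_mul_le hx]; omega
  have hmul := (PySem.Int.floordiv_eq_iff_of_pos hx).mp (rfl (a := PySem.Int.floordiv N x))
  rw [PySem.Int.le_floordiv_iff_mul_le (by omega : (0:Int) < PySem.Int.floordiv N x)]
  calc x * PySem.Int.floordiv N x = PySem.Int.floordiv N x * x := by ring
    _ ≤ N := hmul.1

-- while x <= N: … ; the extra '1 ≤ x' in the guard is only a totalisation guard for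
-- termination (Python starts the loop at x = 1 and x only increases, so it never fails there)
def qrLoop (N x : Int) (ans : List (Int × Int × Int)) : List (Int × Int × Int) :=
  if h : 1 ≤ x ∧ x ≤ N then  -- Python: while x <= N
    let v := PySem.Int.floordiv N x
    let r := PySem.Int.floordiv N v
    qrLoop N (r + 1) (ans ++ [(x, r + 1, v)])
  else ans
termination_by (N + 1 - x).toNat
decreasing_by
  have := qrLoop_progress N x h.1 h.2
  omega

def quotient_range_alt (N : Int) : List (Int × Int × Int) := qrLoop N 1 []

-- ===== PRECONDITION & SPEC =====
-- Pre_ excludes exactly the negative inputs, on which Python's math.isqrt raises ValueError.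
def Pre_quotient_range (N : Int) : Prop := 0 ≤ N
instance (N : Int) : Decidable (Pre_quotient_range N) := by unfold Pre_quotient_range; infer_instance
def pvWitness_quotient_range : Int := 10

def Spec_quotient_range (N : Int) (out : List (Int × Int × Int)) : Prop := out = quotient_range_alt N
instance (N : Int) (out : List (Int × Int × Int)) : Decidable (Spec_quotient_range N out) := by unfold Spec_quotient_range; infer_instance

-- ===== CLAIM (what is proved, stated in full; the proofs are below) =====
def Claim_equal_quotient_range : Prop := ∀ (N : Int), Dom_quotient_range N → Pre_quotient_range N → Spec_quotient_range N (quotient_range N)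

-- ===== LEMMAS AND PROOFS =====

theorem fd_brackets (N b : Int) (hb : 0 < b) :
    PySem.Int.floordiv N b * b ≤ N ∧ N < (PySem.Int.floordiv N b + 1) * b :=
  (PySem.Int.floordiv_eq_iff_of_pos hb).mp rfl

theorem fd_nonneg (N b : Int) (hN : 0 ≤ N) (hb : 0 < b) : 0 ≤ PySem.Int.floordiv N b := by
  rw [PySem.Int.le_floordiv_iff_mul_le hb]; omega

theorem fd_le_self (N b : Int) (hN : 0 ≤ N) (hb : 1 ≤ b) : PySem.Int.floordiv N b ≤ N := by
  have h : PySem.Int.floordiv N b < N + 1 := by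
    rw [PySem.Int.floordiv_lt_iff_lt_mul (by omega)]
    nlinarith
  omega

theorem fd_antitone (N b b' : Int) (hN : 0 ≤ N) (hb : 0 < b) (hbb : b ≤ b') :
    PySem.Int.floordiv N b' ≤ PySem.Int.floordiv N b := by
  have h1 := (fd_brackets N b' (by omega)).1
  have h0 := fd_nonneg N b' hN (by omega)
  rw [PySem.Int.le_floordiv_iff_mul_le hb]
  nlinarith

-- N // (N // x) = x  whenever 1 ≤ x and x² ≤ N  (every block below √N is a singleton)
theorem fd_fd_eq (N x : Int) (hx : 1 ≤ x) (hxx : x * x ≤ N) :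
    PySem.Int.floordiv N (PySem.Int.floordiv N x) = x := by
  have hx0 : (0:Int) < x := by omega
  have hb := fd_brackets N x hx0
  have hxv : x ≤ PySem.Int.floordiv N x := by
    rw [PySem.Int.le_floordiv_iff_mul_le hx0]; exact hxx
  rw [PySem.Int.floordiv_eq_iff_of_pos (by omega)]
  constructor
  · nlinarith [hb.1]
  · nlinarith [hb.2]

-- A's first loop, characterised: state after the pair-fold
theorem pairfold_char (N : Int) : ∀ (l : List Int) (acc : List (Int × Int × Int)) (m : Int),
    l.foldl (fun (st : List (Int × Int × Int) × Int) i =>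
      (st.1 ++ [(i, i + 1, PySem.Int.floordiv N i)], PySem.Int.floordiv N i)) (acc, m)
    = (acc ++ l.map (fun i => (i, i + 1, PySem.Int.floordiv N i)),
       (l.map (fun i => PySem.Int.floordiv N i)).getLastD m) := by
  intro l
  induction l with
  | nil => intro acc m; simp
  | cons a t ih =>
    intro acc m
    simp only [List.foldl_cons, List.map_cons, List.getLastD_cons, ih]
    simp

-- B's loop from x = N//(j+1)+1 onwards computes exactly A's second (descending) loop from i = j
theorem qrLoop_tail_aux (N : Int) (hN : 1 ≤ N) :
    ∀ (n : Nat) (j : Int), 0 ≤ j → j ≤ n → ∀ (acc : List (Int × Int × Int)),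
      qrLoop N (PySem.Int.floordiv N (j + 1) + 1) acc =
        (PySem.List.pyRange j 0 (-1)).foldl
          (fun ans i =>
            let L := PySem.Int.floordiv N (i + 1) + 1
            let R := PySem.Int.floordiv N i + 1
            if L < R then ans ++ [(L, R, i)] else ans) acc := by
  intro n
  induction n with
  | zero =>
    intro j hj0 hjn acc
    have hj : j = 0 := by omega
    subst hj
    have h1 : PySem.Int.floordiv N (0 + 1) = N := by
      rw [PySem.Int.floordiv_eq_iff_of_pos (by omega : (0:Int) < 0 + 1)]; omega
    rw [h1, PySem.List.pyRange_neg_one_eq_nil (by omega), List.foldl_nil, qrLoop]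
    rw [dif_neg (by omega)]
  | succ n ih =>
    intro j hj0 hjn acc
    by_cases hj : j = 0
    · subst hj
      have h1 : PySem.Int.floordiv N (0 + 1) = N := by
        rw [PySem.Int.floordiv_eq_iff_of_pos (by omega : (0:Int) < 0 + 1)]; omega
      rw [h1, PySem.List.pyRange_neg_one_eq_nil (by omega), List.foldl_nil, qrLoop]
      rw [dif_neg (by omega)]
    · have hj1 : 1 ≤ j := by omega
      rw [PySem.List.pyRange_neg_one_cons (by omega : (0:Int) < j), List.foldl_cons]
      have hmono := fd_antitone N j (j + 1) (by omega) (by omega) (by omega)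
      by_cases hlt : PySem.Int.floordiv N (j + 1) < PySem.Int.floordiv N j
      · -- the block for quotient j is nonempty: B's loop emits exactly A's tuple
        have hbj1 := fd_brackets N (j + 1) (by omega)
        set x : Int := PySem.Int.floordiv N (j + 1) + 1 with hxdef
        have hx1 : 1 ≤ x := by have := fd_nonneg N (j + 1) (by omega) (by omega); omega
        have hxN : x ≤ N := by have := fd_le_self N j (by omega) hj1; omega
        have hvx : PySem.Int.floordiv N x = j := by
          rw [PySem.Int.floordiv_eq_iff_of_pos (by omega : (0:Int) < x)]
          constructor
          · have : x ≤ PySem.Int.floordiv N j := by omega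
            rw [PySem.Int.le_floordiv_iff_mul_le (by omega : (0:Int) < j)] at this
            nlinarith
          · nlinarith [hbj1.2]
        rw [qrLoop, dif_pos ⟨hx1, hxN⟩]
        simp only [hvx]
        rw [if_pos (show x < PySem.Int.floordiv N j + 1 by omega)]
        have hrec := ih (j - 1) (by omega) (by omega)
          (acc ++ [(x, PySem.Int.floordiv N j + 1, j)])
        have hj' : j - 1 + 1 = j := by ring
        rw [hj'] at hrec
        exact hrec
      · -- empty block: A filters the tuple out, B's position does not move past it
        have heq : PySem.Int.floordiv N j = PySem.Int.floordiv N (j + 1) := by omega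
        simp only [if_neg (by omega : ¬ (PySem.Int.floordiv N (j + 1) + 1 < PySem.Int.floordiv N j + 1))]
        have hrec := ih (j - 1) (by omega) (by omega) acc
        have hj' : j - 1 + 1 = j := by ring
        rw [hj', heq] at hrec
        exact hrec

-- B's loop walks the singleton blocks 1, 2, …, √N one at a time, reproducing A's first loop
theorem qrLoop_front (N : Int) (hN : 0 ≤ N) :
    ∀ (k : Nat) (x : Int), 1 ≤ x → x * x ≤ N → x + k = (Nat.sqrt N.toNat : Int) + 1 →
      ∀ (acc : List (Int × Int × Int)),
      qrLoop N x acc =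
        qrLoop N ((Nat.sqrt N.toNat : Int) + 1)
          (acc ++ (PySem.List.pyRange x ((Nat.sqrt N.toNat : Int) + 1) 1).map
            (fun i => (i, i + 1, PySem.Int.floordiv N i))) := by
  intro k
  induction k with
  | zero =>
    intro x hx1 hxx hk acc
    have hx : x = (Nat.sqrt N.toNat : Int) + 1 := by omega
    subst hx
    rw [PySem.List.pyRange_one_eq_nil (by omega), List.map_nil, List.append_nil]
  | succ k ih =>
    intro x hx1 hxx hk acc
    have hxN : x ≤ N := by nlinarith
    have hvx := fd_fd_eq N x hx1 hxx
    rw [qrLoop, dif_pos ⟨hx1, hxN⟩]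
    simp only [hvx]
    have hxs : x ≤ (Nat.sqrt N.toNat : Int) := by omega
    have hnext : (x + 1) * (x + 1) ≤ N ∨ x + 1 = (Nat.sqrt N.toNat : Int) + 1 := by
      by_cases h : x + 1 = (Nat.sqrt N.toNat : Int) + 1
      · right; exact h
      · left
        have hs1 : x + 1 ≤ (Nat.sqrt N.toNat : Int) := by omega
        have hx1n : (x + 1).toNat ≤ Nat.sqrt N.toNat := by omega
        have := (Nat.le_sqrt.mp hx1n)
        have hcast : ((x + 1).toNat : Int) = x + 1 := by omega
        have : (((x + 1).toNat * (x + 1).toNat : Nat) : Int) ≤ ((N.toNat : Nat) : Int) := by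
          exact_mod_cast this
        push_cast at this
        rw [hcast] at this
        omega
    have hxx1 : (x + 1) * (x + 1) ≤ N ∨ x + 1 = (Nat.sqrt N.toNat : Int) + 1 := hnext
    have hstep : qrLoop N (x + 1) (acc ++ [(x, x + 1, PySem.Int.floordiv N x)]) =
        qrLoop N ((Nat.sqrt N.toNat : Int) + 1)
          ((acc ++ [(x, x + 1, PySem.Int.floordiv N x)]) ++
            (PySem.List.pyRange (x + 1) ((Nat.sqrt N.toNat : Int) + 1) 1).map
              (fun i => (i, i + 1, PySem.Int.floordiv N i))) := by
      rcases hxx1 with h | h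
      · exact ih (x + 1) (by omega) h (by omega) _
      · rw [h, PySem.List.pyRange_one_eq_nil (by omega), List.map_nil, List.append_nil, qrLoop]
      -- (if x+1 is already past √N the target call is the same call)
    rw [hstep]
    rw [PySem.List.pyRange_one_cons (by omega : x < (Nat.sqrt N.toNat : Int) + 1)]
    simp [List.append_assoc]

theorem sqrt_mul_self_le (N : Int) (hN : 0 ≤ N) :
    (Nat.sqrt N.toNat : Int) * (Nat.sqrt N.toNat : Int) ≤ N := by
  have h := Nat.sqrt_le' N.toNat
  rw [pow_two] at h
  have h2 : ((Nat.sqrt N.toNat : Nat) : Int) * ((Nat.sqrt N.toNat : Nat) : Int) ≤ ((N.toNat : Nat) : Int) := by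
    exact_mod_cast h
  have h3 : ((N.toNat : Nat) : Int) = N := by omega
  rw [h3] at h2
  exact h2

theorem floordiv_sqrt_pos (N : Int) (hN : 1 ≤ N) :
    1 ≤ PySem.Int.floordiv N (Nat.sqrt N.toNat : Int) := by
  have hs1 : 1 ≤ (Nat.sqrt N.toNat : Int) := by
    have : 0 < Nat.sqrt N.toNat := Nat.sqrt_pos.mpr (by omega)
    omega
  have hss := sqrt_mul_self_le N (by omega)
  rw [PySem.Int.le_floordiv_iff_mul_le (by omega)]
  nlinarith

-- ===== VERDICT (by name: the statement is the Claim_ definition above) =====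
theorem quotient_range_spec : Claim_equal_quotient_range := by
  intro N _ hPre
  unfold Spec_quotient_range Pre_quotient_range at *
  by_cases hN : N = 0
  · subst hN
    have hA : quotient_range 0 = [] := by decide
    have hB : quotient_range_alt 0 = [] := by
      unfold quotient_range_alt
      rw [qrLoop, dif_neg (by omega)]
    rw [hA, hB]
  · have hN1 : 1 ≤ N := by omega
    set s : Int := (Nat.sqrt N.toNat : Int) with hsdef
    have hs1 : 1 ≤ s := by
      have : 0 < Nat.sqrt N.toNat := Nat.sqrt_pos.mpr (by omega)
      omega
    have hss : s * s ≤ N := sqrt_mul_self_le N (by omega)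
    set m : Int := PySem.Int.floordiv N s with hmdef
    have hm1 : 1 ≤ m := floordiv_sqrt_pos N hN1
    -- A's first loop
    have hr : PySem.List.pyRange 1 (s + 1) 1 = PySem.List.pyRange 1 s 1 ++ [s] :=
      PySem.List.pyRange_one_succ_right (by omega)
    have hlast : ((PySem.List.pyRange 1 (s + 1) 1).map (fun i => PySem.Int.floordiv N i)).getLastD N = m := by
      rw [hr]; simp [hmdef]
    have hA : quotient_range N =
        (PySem.List.pyRange (m - 1) 0 (-1)).foldl
          (fun ans i =>
            let L := PySem.Int.floordiv N (i + 1) + 1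
            let R := PySem.Int.floordiv N i + 1
            if L < R then ans ++ [(L, R, i)] else ans)
          ((PySem.List.pyRange 1 (s + 1) 1).map (fun i => (i, i + 1, PySem.Int.floordiv N i))) := by
      simp only [quotient_range]
      rw [pairfold_char]
      simp at hlast ⊢
      rw [hlast]
    -- B's loop: front part then tail part
    have hfd : PySem.Int.floordiv N ((m - 1) + 1) + 1 = s + 1 := by
      have : (m - 1) + 1 = m := by ring
      rw [this, hmdef, fd_fd_eq N s hs1 hss]
    have hB : quotient_range_alt N =
        qrLoop N (s + 1)
          ([] ++ (PySem.List.pyRange 1 (s + 1) 1).map (fun i => (i, i + 1, PySem.Int.floordiv N i))) := by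
      unfold quotient_range_alt
      exact qrLoop_front N (by omega) s.toNat 1 (by omega) (by nlinarith) (by omega) []
    rw [hA, hB, List.nil_append, ← hfd]
    exact (qrLoop_tail_aux N hN1 (m - 1).toNat (m - 1) (by omega) (by omega) _).symm
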